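-- pv_equiv track=rewrite | github.com/ni/measurement-plugin-python | packages/generator/ni_measurement_plugin_sdk_generator/ni_measurement_plugin_client_generator/template.py | _get_python_class_name
-- ===== SOURCE A (Python) =====
-- _INVALID_CHARS = "`~!@#$%^&*()-+={}[]\|:;',<>.?/ \n"
--
-- def _get_python_class_name(name: str) -> str:
--     class_name = name.replace("_", " ").title().replace(" ", "")
--
--     # Replace any spaces or special characters with an '_'.
--     if not class_name.isidentifier():
--         for ch in _INVALID_CHARS:
--             class_name = class_name.replace(ch, "")
--
--     # Python identifiers cannot begin with an integer. So prefix '_' if it does.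
--     if class_name[0].isdigit():
--         class_name = "_" + class_name
--
--     return class_name + "Enum"
-- ===== SOURCE B (Python) =====
-- _INVALID_CHARS = "`~!@#$%^&*()-+={}[]\|:;',<>.?/ \n"
--
-- def _get_python_class_name(name: str) -> str:
--     # One pass: title-case on word boundaries, then keep only valid characters.
--     # (An identifier contains no invalid characters, so the filter is a no-op
--     # exactly when A's isidentifier() guard would skip its removal loop.)
--     titled = name.replace("_", " ").title()
--     class_name = "".join(c for c in titled if c not in _INVALID_CHARS)
--     if class_name[0].isdigit():
--         class_name = "_" + class_name
--     return class_name + "Enum"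
-- ===== Notes on version B (the rewrite author's own statement) =====
-- stated objective: idiomatic
-- what changed: A conditionally (behind an isidentifier() guard) removes invalid characters by running one full replace() pass per character of the 34-char _INVALID_CHARS alphabet, and separately strips spaces with another replace(); B folds the space-strip, the guard and the removal loop into a single filtering pass over the titled string that keeps characters not in _INVALID_CHARS.
-- outside the precondition, e.g. on _get_python_class_name('_'): A raises IndexError, B raises IndexError
import Mathlib
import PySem

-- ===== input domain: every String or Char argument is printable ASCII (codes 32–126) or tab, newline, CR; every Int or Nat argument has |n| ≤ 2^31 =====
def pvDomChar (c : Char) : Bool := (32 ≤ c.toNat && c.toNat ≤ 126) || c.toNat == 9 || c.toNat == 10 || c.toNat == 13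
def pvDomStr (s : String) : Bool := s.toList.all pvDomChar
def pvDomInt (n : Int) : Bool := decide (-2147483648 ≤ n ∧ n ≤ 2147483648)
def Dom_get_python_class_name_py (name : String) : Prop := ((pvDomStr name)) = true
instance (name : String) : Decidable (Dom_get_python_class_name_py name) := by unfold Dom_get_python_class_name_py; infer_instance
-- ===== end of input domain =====

-- B folds A's replace-space step, isidentifier guard and 34-pass removal loop into one
-- filtering pass over the titled string (idiomatic); return values agree on all of Pre_.

-- ===== PORT A =====

-- _INVALID_CHARS (the Python string literal's characters; "\|" is backslash, pipe)
def pvInvalidChars : List Char := "`~!@#$%^&*()-+={}[]\\|:;',<>.?/ \n".toList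

-- hand port of str.title (exact on the ASCII domain: a letter after a non-letter is
-- uppercased, a letter after a letter is lowercased, other characters unchanged)
def pvTitle : List Char → Bool → List Char
  | [], _ => []
  | c :: cs, prevCased =>
    (if PySem.Chars.isalpha c then
        (if prevCased then PySem.Chars.lowerChar c else PySem.Chars.upperChar c)
      else c) :: pvTitle cs (PySem.Chars.isalpha c)

-- hand port of str.isidentifier (exact on the ASCII domain)
def pvIsIdentifier : List Char → Bool
  | [] => false
  | c :: rest =>
    (PySem.Chars.isalpha c || c == '_') && rest.all (fun x => PySem.Chars.isalnum x || x == '_')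

def get_python_class_name_py (name : String) : String :=
  -- class_name = name.replace("_", " ").title().replace(" ", "")
  let cn0 := PySem.Chars.replace (pvTitle (PySem.Chars.replace name.toList ['_'] [' ']) false) [' '] []
  -- if not class_name.isidentifier(): for ch in _INVALID_CHARS: class_name = class_name.replace(ch, "")
  let cn1 := if !pvIsIdentifier cn0 then
      pvInvalidChars.foldl (fun s ch => PySem.Chars.replace s [ch] []) cn0
    else cn0
  -- class_name[0] (IndexError on empty — excluded by Pre_)
  match PySem.List.pyGet? cn1 0 with
  | none => ""
  | some c0 =>
    let cn2 := if PySem.Chars.isdigit c0 then '_' :: cn1 else cn1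
    String.mk (cn2 ++ "Enum".toList)

-- ===== PORT B =====

def get_python_class_name_py_alt (name : String) : String :=
  -- titled = name.replace("_", " ").title()
  let titled := pvTitle (PySem.Chars.replace name.toList ['_'] [' ']) false
  -- class_name = "".join(c for c in titled if c not in _INVALID_CHARS)  (single-char membership)
  let cn := titled.filter (fun c => !pvInvalidChars.contains c)
  -- class_name[0] (IndexError on empty — excluded by Pre_)
  match PySem.List.pyGet? cn 0 with
  | none => ""
  | some c0 =>
    String.mk ((if PySem.Chars.isdigit c0 then '_' :: cn else cn) ++ "Enum".toList)

-- ===== PRECONDITION & SPEC =====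

-- Pre_ excludes exactly the inputs on which A raises IndexError (class_name[0] on an
-- empty string): names whose every character is '_' or an _INVALID_CHARS character.
def Pre_get_python_class_name_py (name : String) : Prop :=
  name.toList.any (fun c => !pvInvalidChars.contains c && c != '_') = true
instance (name : String) : Decidable (Pre_get_python_class_name_py name) := by
  unfold Pre_get_python_class_name_py; infer_instance

def pvWitness_get_python_class_name_py : String := "measurement_2d"

def Spec_get_python_class_name_py (name : String) (out : String) : Prop := out = get_python_class_name_py_alt name
instance (name : String) (out : String) : Decidable (Spec_get_python_class_name_py name out) := by unfold Spec_get_python_class_name_py; infer_instance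

-- ===== CLAIM (what is proved, stated in full; the proofs are below) =====
def Claim_equal_get_python_class_name_py : Prop := ∀ (name : String), Dom_get_python_class_name_py name → Pre_get_python_class_name_py name → Spec_get_python_class_name_py name (get_python_class_name_py name)

-- ===== LEMMAS AND PROOFS =====

-- str.replace with a one-character pattern rewrites each character independently
theorem pv_replace_go_single (a : Char) (nb : List Char) :
    ∀ (l : List Char) (fuel : Nat) (acc : List Char), l.length ≤ fuel →
      PySem.Chars.replace.go [a] nb fuel l acc
        = acc.reverse ++ l.flatMap (fun x => if x == a then nb else [x]) := by
  intro l
  induction l with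
  | nil =>
    intro fuel acc _
    cases fuel <;> simp [PySem.Chars.replace.go]
  | cons c t ih =>
    intro fuel acc hle
    cases fuel with
    | zero => simp at hle
    | succ fuel =>
      simp only [List.length_cons, Nat.succ_le_succ_iff] at hle
      rw [PySem.Chars.replace.go]
      by_cases h : c = a
      · subst h
        rw [if_pos (by simp [List.isPrefixOf])]
        simp only [List.length_cons, List.length_nil, Nat.zero_add, List.drop_succ_cons,
          List.drop_zero]
        rw [ih fuel _ hle]
        simp
      · rw [if_neg (by simp only [List.isPrefixOf, List.isPrefixOf_nil_left,
          Bool.and_true, beq_iff_eq]; exact fun hc => h hc.symm)]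
        rw [ih fuel _ hle]
        simp [h]

theorem pv_replace_single (cs : List Char) (a : Char) (nb : List Char) :
    PySem.Chars.replace cs [a] nb = cs.flatMap (fun x => if x == a then nb else [x]) := by
  rw [PySem.Chars.replace]
  simp [pv_replace_go_single a nb cs cs.length [] (le_refl _)]

theorem pv_replace_del (cs : List Char) (a : Char) :
    PySem.Chars.replace cs [a] [] = cs.filter (fun x => x != a) := by
  rw [pv_replace_single]
  induction cs with
  | nil => rfl
  | cons c t ih =>
    simp only [beq_iff_eq] at ih ⊢
    by_cases h : c = a <;> simp [h, ih]

-- the removal loop over _INVALID_CHARS is one filter by (non-)membership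
theorem pv_foldl_del (l : List Char) :
    ∀ cs : List Char,
      l.foldl (fun s ch => PySem.Chars.replace s [ch] []) cs
        = cs.filter (fun x => !l.contains x) := by
  induction l with
  | nil => intro cs; simp
  | cons a t ih =>
    intro cs
    rw [List.foldl_cons, ih, pv_replace_del, List.filter_filter]
    apply List.filter_congr
    intro x _
    by_cases h : x = a <;> simp [h]

theorem pv_filter_filter_absorb (p q : Char → Bool) (cs : List Char)
    (h : ∀ x, p x = true → q x = true) :
    (cs.filter q).filter p = cs.filter p := by
  rw [List.filter_filter]
  apply List.filter_congr
  intro x _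
  by_cases hp : p x = true
  · simp [hp, h x hp]
  · simp [Bool.eq_false_iff.mpr hp]

-- no character of _INVALID_CHARS is an identifier character
theorem pv_inv_spec :
    pvInvalidChars.all
      (fun y => (!(PySem.Chars.isalnum y || y == '_')) && (!(PySem.Chars.isalpha y || y == '_'))) = true := by
  decide

theorem pv_P_imp_ne_space (x : Char) (h : (!pvInvalidChars.contains x) = true) :
    (x != ' ') = true := by
  simp only [Bool.not_eq_eq_eq_not, Bool.not_true, List.contains_eq_mem,
    decide_eq_false_iff_not] at h
  simp only [bne_iff_ne, ne_eq]
  intro hx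
  exact h (hx ▸ (by decide : ' ' ∈ pvInvalidChars))

-- core equality: A's conditional removal pipeline equals B's single filter
theorem pv_core_eq (t : List Char) :
    (if !pvIsIdentifier (PySem.Chars.replace t [' '] []) then
       pvInvalidChars.foldl (fun s ch => PySem.Chars.replace s [ch] [])
         (PySem.Chars.replace t [' '] [])
     else PySem.Chars.replace t [' '] [])
    = t.filter (fun c => !pvInvalidChars.contains c) := by
  by_cases h : pvIsIdentifier (PySem.Chars.replace t [' '] []) = true
  · rw [if_neg (by simp [h])]
    rw [pv_replace_del] at h ⊢
    rw [← pv_filter_filter_absorb (fun x => !pvInvalidChars.contains x)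
          (fun x => x != ' ') t pv_P_imp_ne_space]
    refine (List.filter_eq_self.mpr ?_).symm
    intro x hx
    cases hcn : List.filter (fun x => x != ' ') t with
    | nil => rw [hcn] at hx; simp at hx
    | cons c rest =>
      rw [hcn] at h hx
      simp only [pvIsIdentifier, Bool.and_eq_true, List.all_eq_true] at h
      have hx' : (PySem.Chars.isalnum x || x == '_') = true ∨
          (PySem.Chars.isalpha x || x == '_') = true := by
        rcases List.mem_cons.mp hx with hx | hx
        · exact Or.inr (hx ▸ h.1)
        · exact Or.inl (h.2 x hx)
      simp only [Bool.not_eq_eq_eq_not, Bool.not_true, List.contains_eq_mem,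
        decide_eq_false_iff_not]
      intro hmem
      have := List.all_eq_true.mp pv_inv_spec x hmem
      simp only [Bool.and_eq_true, Bool.not_eq_eq_eq_not, Bool.not_true] at this
      rcases hx' with hx' | hx'
      · rw [this.1] at hx'; exact Bool.false_ne_true hx'
      · rw [this.2] at hx'; exact Bool.false_ne_true hx'
  · rw [if_pos (by simp [h])]
    rw [pv_foldl_del, pv_replace_del]
    exact pv_filter_filter_absorb (fun x => !pvInvalidChars.contains x)
      (fun x => x != ' ') t pv_P_imp_ne_space

-- ===== VERDICT (by name: the statement is the Claim_ definition above) =====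
theorem get_python_class_name_py_spec : Claim_equal_get_python_class_name_py := by
  intro name _ _
  unfold Spec_get_python_class_name_py
  simp only [get_python_class_name_py, get_python_class_name_py_alt]
  rw [pv_core_eq (pvTitle (PySem.Chars.replace name.toList ['_'] [' ']) false)]
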